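-- pv_equiv track=rewrite | github.com/niinasaarelainen/omat-python-projektit2020 | sanasta_sanoja/sanasta_sanoja.py | scan_file
-- ===== SOURCE A (Python) =====
-- def scan_file(rivit, arvottu_sana):
--     muistiin = []
--     tallenna = False
--     for rivi in rivit:
--         if tallenna and "SEURAAVA SANA:" in rivi:
--            break
--         if tallenna:
--             muistiin.append(rivi.strip())
--         if arvottu_sana in rivi:
--             tallenna = True
--     return muistiin
-- ===== SOURCE B (Python) =====
-- def scan_file(rivit, arvottu_sana):
--     i = next((k for k, rivi in enumerate(rivit) if arvottu_sana in rivi), None)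
--     if i is None:
--         return []
--     tail = rivit[i + 1:]
--     j = next((k for k, rivi in enumerate(tail) if "SEURAAVA SANA:" in rivi), len(tail))
--     return [rivi.strip() for rivi in tail[:j]]
-- ===== Notes on version B (the rewrite author's own statement) =====
-- stated objective: alternative
-- what changed: Replaced the boolean-flag state machine with a stateless two-phase pipeline: find the index of the first line containing arvottu_sana, slice the lines after it up to the first 'SEURAAVA SANA:' line, and strip them in a comprehension.
import Mathlib
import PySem

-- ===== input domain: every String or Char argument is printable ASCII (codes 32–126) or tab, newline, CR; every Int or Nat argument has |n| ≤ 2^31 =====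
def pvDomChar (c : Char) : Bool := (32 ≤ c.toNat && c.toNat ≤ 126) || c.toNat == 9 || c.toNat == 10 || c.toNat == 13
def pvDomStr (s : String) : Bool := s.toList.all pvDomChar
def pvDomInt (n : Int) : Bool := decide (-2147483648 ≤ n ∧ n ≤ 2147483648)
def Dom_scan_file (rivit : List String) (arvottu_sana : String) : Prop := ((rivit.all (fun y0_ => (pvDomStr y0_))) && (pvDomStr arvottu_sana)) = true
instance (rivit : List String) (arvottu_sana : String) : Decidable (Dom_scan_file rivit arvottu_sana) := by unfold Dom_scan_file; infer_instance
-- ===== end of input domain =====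

-- B replaces A's boolean-flag state machine by a two-phase find-then-slice decomposition (alternative, same cost).

-- ===== PORT A =====
-- the flag-driven loop of A, ported as structural recursion carrying the flag `tallenna`;
-- `break` becomes returning the collected remainder []
def scanA (arvottu_sana : String) : List String → Bool → List String
  | [], _ => []
  | rivi :: rest, tallenna =>
    if tallenna && PySem.Str.isIn "SEURAAVA SANA:" rivi then []
    else
      (if tallenna then [PySem.Str.strip rivi] else []) ++
        scanA arvottu_sana rest (tallenna || PySem.Str.isIn arvottu_sana rivi)

def scan_file (rivit : List String) (arvottu_sana : String) : List String :=
  scanA arvottu_sana rivit false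

-- ===== PORT B =====
-- rivit[i+1:] with 0 ≤ i+1 is exactly List.drop (i+1); tail[:j] with 0 ≤ j ≤ len is List.take j
def scan_file_alt (rivit : List String) (arvottu_sana : String) : List String :=
  match rivit.findIdx? (fun rivi => PySem.Str.isIn arvottu_sana rivi) with
  | none => []
  | some i =>
    let tail := rivit.drop (i + 1)
    let j := (tail.findIdx? (fun rivi => PySem.Str.isIn "SEURAAVA SANA:" rivi)).getD tail.length
    (tail.take j).map PySem.Str.strip

-- ===== PRECONDITION & SPEC =====
def Spec_scan_file (rivit : List String) (arvottu_sana : String) (out : List String) : Prop := out = scan_file_alt rivit arvottu_sana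
instance (rivit : List String) (arvottu_sana : String) (out : List String) : Decidable (Spec_scan_file rivit arvottu_sana out) := by unfold Spec_scan_file; infer_instance

-- ===== CLAIM (what is proved, stated in full; the proofs are below) =====
def Claim_equal_scan_file : Prop := ∀ (rivit : List String) (arvottu_sana : String), Dom_scan_file rivit arvottu_sana → Spec_scan_file rivit arvottu_sana (scan_file rivit arvottu_sana)

-- ===== LEMMAS AND PROOFS =====

-- once the flag is set, A collects stripped lines up to the first marker line
theorem scanA_true (w : String) (l : List String) :
    scanA w l true =
      (l.take (((l.findIdx? (fun rivi => PySem.Str.isIn "SEURAAVA SANA:" rivi)).getD l.length))).map PySem.Str.strip := by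
  induction l with
  | nil => rfl
  | cons r t ih =>
    by_cases h : PySem.Str.isIn "SEURAAVA SANA:" r = true
    · simp at h
      simp [scanA, List.findIdx?_cons, h]
    · simp at h
      simp only [List.findIdx?_cons]
      simp only [scanA, Bool.true_and, if_true, Bool.true_or, ih]
      cases hf : t.findIdx? (fun rivi => PySem.Str.isIn "SEURAAVA SANA:" rivi) with
      | none => simp at hf; simp [h, List.take_of_length_le]
      | some j => simp at hf; simp [h]

-- before the flag is set, A behaves like B's find-then-collect
theorem scanA_false (w : String) (l : List String) :
    scanA w l false = scan_file_alt l w := by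
  induction l with
  | nil => rfl
  | cons r t ih =>
    by_cases h : PySem.Str.isIn w r = true
    · have h' : PySem.Chars.isIn w.toList r.toList = true := by simpa using h
      rw [show scanA w (r :: t) false = scanA w t true from by simp [scanA, h']]
      rw [scanA_true]
      unfold scan_file_alt
      rw [List.findIdx?_cons, if_pos h]
      simp [List.drop_succ_cons]
    · have h' : PySem.Chars.isIn w.toList r.toList = false := by simpa using h
      rw [show scanA w (r :: t) false = scanA w t false from by simp [scanA, h']]
      rw [ih]
      unfold scan_file_alt
      rw [List.findIdx?_cons, if_neg h]
      cases hf : t.findIdx? (fun rivi => PySem.Str.isIn w rivi) with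
      | none => simp
      | some i => simp [List.drop_succ_cons]

-- ===== VERDICT (by name: the statement is the Claim_ definition above) =====
theorem scan_file_spec : Claim_equal_scan_file := by
  intro rivit w _
  unfold Spec_scan_file scan_file
  exact scanA_false w rivit
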